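-- pv_equiv track=rewrite | github.com/jek5224/MuscleRetargetting | tools/bake_pyuipc.py | extract_surface_verts
-- ===== SOURCE A (Python) =====
-- def extract_surface_verts(muscle):
--     """Get set of surface vertex indices from tetrahedra surface faces."""
--     tets = muscle['tetrahedra']
--     # Extract surface by finding faces that appear only once
--     from collections import Counter
--     face_count = Counter()
--     tet_faces = []
--     for ti, t in enumerate(tets):
--         faces = [(t[0],t[1],t[2]), (t[0],t[1],t[3]),
--                  (t[0],t[2],t[3]), (t[1],t[2],t[3])]
--         for f in faces:
--             key = tuple(sorted(f))
--             face_count[key] += 1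
--             tet_faces.append(key)
--     surface_verts = set()
--     for face, count in face_count.items():
--         if count == 1:
--             surface_verts.update(face)
--     return sorted(surface_verts)
-- ===== SOURCE B (Python) =====
-- def extract_surface_verts(muscle):
--     """Get set of surface vertex indices from tetrahedra surface faces.
--
--     Alternative strategy: gather all (sorted) face keys into one flat list,
--     sort it, and scan adjacent runs; a run of length 1 is a surface face.
--     """
--     tets = muscle['tetrahedra']
--     keys = [tuple(sorted(f))
--             for t in tets
--             for f in ((t[0], t[1], t[2]), (t[0], t[1], t[3]),
--                       (t[0], t[2], t[3]), (t[1], t[2], t[3]))]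
--     keys.sort()
--     surface = set()
--     i = 0
--     n = len(keys)
--     while i < n:
--         j = i + 1
--         while j < n and keys[j] == keys[i]:
--             j += 1
--         if j == i + 1:
--             surface.update(keys[i])
--         i = j
--     return sorted(surface)
-- ===== Notes on version B (the rewrite author's own statement) =====
-- stated objective: alternative
-- what changed: Replaces the Counter hash-count plus dict-items pass by gathering all face keys into one flat list, sorting it, and scanning adjacent equal runs, collecting the vertices of runs of length exactly 1.
-- outside the precondition, e.g. on extract_surface_verts({}): A raises KeyError, B raises KeyError
import Mathlib
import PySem

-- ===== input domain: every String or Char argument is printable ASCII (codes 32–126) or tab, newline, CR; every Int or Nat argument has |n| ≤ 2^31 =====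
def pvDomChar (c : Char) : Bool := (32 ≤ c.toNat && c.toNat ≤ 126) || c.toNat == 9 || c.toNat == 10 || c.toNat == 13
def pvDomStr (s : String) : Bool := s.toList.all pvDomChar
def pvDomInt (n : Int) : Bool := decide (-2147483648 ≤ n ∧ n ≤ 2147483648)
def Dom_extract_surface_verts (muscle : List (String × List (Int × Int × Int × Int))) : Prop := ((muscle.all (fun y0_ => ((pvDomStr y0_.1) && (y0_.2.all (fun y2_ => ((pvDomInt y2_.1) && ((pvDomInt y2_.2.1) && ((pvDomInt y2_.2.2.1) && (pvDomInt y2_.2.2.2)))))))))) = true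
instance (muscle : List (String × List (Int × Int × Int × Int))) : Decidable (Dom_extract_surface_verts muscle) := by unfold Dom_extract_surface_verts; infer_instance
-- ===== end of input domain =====

-- B replaces A's Counter hash-count + dict-items pass by sort-then-adjacent-run scan over the flat face-key list (alternative decomposition, same results).


-- ===== PORT A =====
-- key = tuple(sorted(f)) for a face f
def faceKey (f : Int × Int × Int) : List Int :=
  PySem.List.sorted [f.1, f.2.1, f.2.2] (fun x => x) false

-- the four faces of a tetrahedron t
def tetFaces (t : Int × Int × Int × Int) : List (Int × Int × Int) :=
  [(t.1, t.2.1, t.2.2.1), (t.1, t.2.1, t.2.2.2),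
   (t.1, t.2.2.1, t.2.2.2), (t.2.1, t.2.2.1, t.2.2.2)]

def extract_surface_verts (muscle : List (String × List (Int × Int × Int × Int))) : List Int :=
  match (PySem.Dict.ofList muscle).get? "tetrahedra" with
  | none => []   -- KeyError in Python; excluded by Pre_
  | some tets =>
    let st := (PySem.List.enumerate tets).foldl
      (fun (st : PySem.Dict (List Int) Int × List (List Int)) (tit : Int × (Int × Int × Int × Int)) =>
        (tetFaces tit.2).foldl
          (fun (st : PySem.Dict (List Int) Int × List (List Int)) f =>
            let key := faceKey f
            (st.1.modify key 0 (· + 1), st.2 ++ [key])) st)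
      (PySem.Dict.empty, [])
    let face_count := st.1
    let surface_verts := face_count.items.foldl
      (fun (s : PySem.Set Int) fc => if fc.2 = 1 then PySem.Set.update s fc.1 else s)
      PySem.Set.empty
    PySem.List.sorted surface_verts (fun x => x) false

-- ===== PORT B =====
-- the run scan over the sorted key list: advance j over keys equal to keys[i]
-- (takeWhile/dropWhile on the tail), collect the face's vertices when the run has length 1
def scanRuns : List (List Int) → PySem.Set Int → PySem.Set Int
  | [], s => s
  | k :: rest, s =>
    let s' := if rest.takeWhile (fun x => x == k) = [] then PySem.Set.update s k else s
    scanRuns (rest.dropWhile (fun x => x == k)) s'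
termination_by l _ => l.length
decreasing_by
  simpa using Nat.lt_succ_of_le (List.length_dropWhile_le _ _)

def extract_surface_verts_alt (muscle : List (String × List (Int × Int × Int × Int))) : List Int :=
  match (PySem.Dict.ofList muscle).get? "tetrahedra" with
  | none => []
  | some tets =>
    let keys := tets.flatMap (fun t => (tetFaces t).map faceKey)
    let ks := PySem.List.sorted keys (fun x => x) false
    PySem.List.sorted (scanRuns ks PySem.Set.empty) (fun x => x) false

-- ===== PRECONDITION & SPEC =====
-- Pre_ excludes exactly the inputs where muscle['tetrahedra'] raises KeyError
def Pre_extract_surface_verts (muscle : List (String × List (Int × Int × Int × Int))) : Prop :=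
  "tetrahedra" ∈ muscle.map Prod.fst
instance (muscle : List (String × List (Int × Int × Int × Int))) : Decidable (Pre_extract_surface_verts muscle) := by unfold Pre_extract_surface_verts; infer_instance

def pvWitness_extract_surface_verts : (List (String × List (Int × Int × Int × Int))) :=
  [("tetrahedra", [(0, 1, 2, 3)])]

def Spec_extract_surface_verts (muscle : List (String × List (Int × Int × Int × Int))) (out : List Int) : Prop := out = extract_surface_verts_alt muscle
instance (muscle : List (String × List (Int × Int × Int × Int))) (out : List Int) : Decidable (Spec_extract_surface_verts muscle out) := by unfold Spec_extract_surface_verts; infer_instance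

-- ===== CLAIM (what is proved, stated in full; the proofs are below) =====
def Claim_equal_extract_surface_verts : Prop := ∀ (muscle : List (String × List (Int × Int × Int × Int))), Dom_extract_surface_verts muscle → Pre_extract_surface_verts muscle → Spec_extract_surface_verts muscle (extract_surface_verts muscle)

-- ===== LEMMAS AND PROOFS =====

-- A-side: membership in the "update if count==1" fold
theorem mem_foldl_updateIf {P : List Int → Prop} [DecidablePred P]
    (l : List (List Int)) (s : PySem.Set Int) (v : Int) :
    v ∈ l.foldl (fun s k => if P k then PySem.Set.update s k else s) s ↔
      v ∈ s ∨ ∃ k ∈ l, P k ∧ v ∈ k := by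
  induction l generalizing s with
  | nil => simp
  | cons k t ih =>
    simp only [List.foldl_cons, ih]
    by_cases h : P k
    · rw [if_pos h]; constructor
      · rintro (h1 | h2)
        · rcases (PySem.Set.mem_update _ _ _).1 h1 with h1 | h1
          · exact Or.inl h1
          · exact Or.inr ⟨k, by simp, h, h1⟩
        · rcases h2 with ⟨k', hk', hp, hv⟩
          exact Or.inr ⟨k', List.mem_cons_of_mem _ hk', hp, hv⟩
      · rintro (h1 | ⟨k', hk', hp, hv⟩)
        · exact Or.inl ((PySem.Set.mem_update _ _ _).2 (Or.inl h1))
        · rcases List.mem_cons.1 hk' with rfl | hk'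
          · exact Or.inl ((PySem.Set.mem_update _ _ _).2 (Or.inr hv))
          · exact Or.inr ⟨k', hk', hp, hv⟩
    · rw [if_neg h]; constructor
      · rintro (h1 | ⟨k', hk', hp, hv⟩)
        · exact Or.inl h1
        · exact Or.inr ⟨k', List.mem_cons_of_mem _ hk', hp, hv⟩
      · rintro (h1 | ⟨k', hk', hp, hv⟩)
        · exact Or.inl h1
        · rcases List.mem_cons.1 hk' with rfl | hk'
          · exact absurd hp h
          · exact Or.inr ⟨k', hk', hp, hv⟩

theorem nodup_foldl_updateIf {P : List Int → Prop} [DecidablePred P]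
    (l : List (List Int)) (s : PySem.Set Int) (hs : s.Nodup) :
    (l.foldl (fun s k => if P k then PySem.Set.update s k else s) s).Nodup := by
  induction l generalizing s with
  | nil => simpa
  | cons k t ih =>
    simp only [List.foldl_cons]
    by_cases h : P k
    · simp only [h, if_pos]; exact ih _ (PySem.Set.nodup_update _ _ hs)
    · simpa [h] using ih _ hs

theorem nodup_scanRuns (l : List (List Int)) (s : PySem.Set Int) (hs : s.Nodup) :
    (scanRuns l s).Nodup := by
  fun_induction scanRuns l s with
  | case1 s => exact hs
  | case2 k rest s s' ih =>
    apply ih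
    by_cases h : rest.takeWhile (fun x => x == k) = []
    · simpa [s', h] using PySem.Set.nodup_update _ _ hs
    · simpa [s', h] using hs

theorem mem_scanRuns (v : Int) : ∀ (n : Nat) (l : List (List Int)), l.length ≤ n →
    ∀ (s : PySem.Set Int), l.Pairwise (· ≤ ·) →
    (v ∈ scanRuns l s ↔ v ∈ s ∨ ∃ k ∈ l, l.count k = 1 ∧ v ∈ k) := by
  intro n
  induction n with
  | zero =>
    intro l hlen s _
    have : l = [] := List.eq_nil_of_length_eq_zero (Nat.le_zero.1 hlen)
    subst this; simp [scanRuns]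
  | succ n ih =>
    intro l hlen s hl
    match l with
    | [] => simp [scanRuns]
    | k :: rest =>
      have hrestp : rest.Pairwise (· ≤ ·) := (List.pairwise_cons.1 hl).2
      have hkle : ∀ x ∈ rest, k ≤ x := (List.pairwise_cons.1 hl).1
      set a := rest.takeWhile (fun x => x == k) with ha_def
      set b := rest.dropWhile (fun x => x == k) with hb_def
      have hab : a ++ b = rest := List.takeWhile_append_dropWhile
      have ha : ∀ x ∈ a, x = k := by
        intro x hx
        rw [ha_def] at hx
        exact eq_of_beq (List.mem_takeWhile_imp (p := fun y => y == k) (l := rest) hx)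
      have hbsub : b.Sublist rest := hb_def ▸ List.dropWhile_sublist _
      have hbp : b.Pairwise (· ≤ ·) := hrestp.sublist hbsub
      have hbk : ∀ x ∈ b, x ≠ k := by
        cases hb : b with
        | nil => simp
        | cons y ys =>
          have hy : (y == k) = false := by
            have := List.head_dropWhile_not (fun x => x == k) (l := rest)
              (by rw [← hb_def, hb]; simp)
            simpa [← hb_def, hb] using this
          have hyk : y ≠ k := by simpa using hy
          have hbp' : (y :: ys).Pairwise (· ≤ ·) := hb ▸ hbp
          intro x hx hxk
          have hyx : y ≤ x := by
            rcases List.mem_cons.1 hx with rfl | h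
            · exact le_refl _
            · exact List.rel_of_pairwise_cons hbp' h
          have hky : k ≤ y := hkle y (hbsub.subset (by rw [hb]; simp))
          exact hyk (le_antisymm (hxk ▸ hyx) hky)
      -- counts
      have hca : a.count k = a.length := List.count_eq_length.2 (fun x hx => (ha x hx).symm)
      have hcb : b.count k = 0 := List.count_eq_zero.2 (fun h => hbk k h rfl)
      have hckl : (k :: rest).count k = 1 + a.length := by
        rw [← hab]; simp [List.count_append, hca, hcb]; ring
      have hck' : ∀ k' ≠ k, (k :: rest).count k' = b.count k' := by
        intro k' hk'
        have hca' : a.count k' = 0 := List.count_eq_zero.2 (fun h => hk' (ha k' h))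
        rw [← hab]; simp [List.count_cons, List.count_append, hca']
        exact fun h => hk' h.symm
      have hunfold : scanRuns (k :: rest) s =
          scanRuns b (if a = [] then PySem.Set.update s k else s) := by
        rw [scanRuns]
      have hblen : b.length ≤ n := by
        have := hbsub.length_le
        simp at hlen; omega
      rw [hunfold, ih b hblen _ hbp]
      by_cases ha0 : a = []
      · -- run of length 1
        have hck1 : (k :: rest).count k = 1 := by rw [hckl, ha0]; simp
        simp only [ha0, if_pos]
        constructor
        · rintro (h1 | ⟨k', hk', hc, hv⟩)
          · rcases (PySem.Set.mem_update _ _ _).1 h1 with h | h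
            · exact Or.inl h
            · exact Or.inr ⟨k, by simp, hck1, h⟩
          · refine Or.inr ⟨k', ?_, ?_, hv⟩
            · exact List.mem_cons_of_mem _ (hbsub.subset hk')
            · rw [hck' k' (hbk k' hk')]; exact hc
        · rintro (h1 | ⟨k', hk', hc, hv⟩)
          · exact Or.inl ((PySem.Set.mem_update _ _ _).2 (Or.inl h1))
          · rcases List.mem_cons.1 hk' with rfl | hk'
            · exact Or.inl ((PySem.Set.mem_update _ _ _).2 (Or.inr hv))
            · rw [← hab, ha0] at hk'
              refine Or.inr ⟨k', hk', ?_, hv⟩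
              rw [← hck' k' (hbk k' hk')]; exact hc
      · -- run of length ≥ 2: k is not a surface face
        have hck2 : (k :: rest).count k ≠ 1 := by
          rw [hckl]
          have : a.length ≠ 0 := fun h => ha0 (List.eq_nil_of_length_eq_zero h)
          omega
        simp only [if_neg ha0]
        constructor
        · rintro (h1 | ⟨k', hk', hc, hv⟩)
          · exact Or.inl h1
          · refine Or.inr ⟨k', List.mem_cons_of_mem _ (hbsub.subset hk'), ?_, hv⟩
            rw [hck' k' (hbk k' hk')]; exact hc
        · rintro (h1 | ⟨k', hk', hc, hv⟩)
          · exact Or.inl h1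
          · rcases List.mem_cons.1 hk' with rfl | hk'
            · exact absurd hc hck2
            · rw [← hab] at hk'
              rcases List.mem_append.1 hk' with hk' | hk'
              · rw [ha k' hk'] at hc; exact absurd hc hck2
              · refine Or.inr ⟨k', hk', ?_, hv⟩
                rw [← hck' k' (hbk k' hk')]; exact hc

theorem innerA (fs : List (Int × Int × Int)) (st : PySem.Dict (List Int) Int × List (List Int)) :
    (fs.foldl (fun (st : PySem.Dict (List Int) Int × List (List Int)) f =>
        (st.1.modify (faceKey f) 0 (· + 1), st.2 ++ [faceKey f])) st).1
    = (fs.map faceKey).foldl (fun d x => d.modify x 0 (· + 1)) st.1 := by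
  induction fs generalizing st with
  | nil => rfl
  | cons f t ih => simp [ih]

theorem outerA (tets : List (Int × Int × Int × Int)) (start : Int)
    (st : PySem.Dict (List Int) Int × List (List Int)) :
    ((PySem.List.enumerate tets start).foldl
      (fun (st : PySem.Dict (List Int) Int × List (List Int)) (tit : Int × (Int × Int × Int × Int)) =>
        (tetFaces tit.2).foldl
          (fun (st : PySem.Dict (List Int) Int × List (List Int)) f =>
            (st.1.modify (faceKey f) 0 (· + 1), st.2 ++ [faceKey f])) st) st).1
    = (tets.flatMap (fun t => (tetFaces t).map faceKey)).foldl
        (fun d x => d.modify x 0 (· + 1)) st.1 := by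
  induction tets generalizing start st with
  | nil => rfl
  | cons t ts ih =>
    rw [PySem.List.enumerate_cons]
    simp only [List.foldl_cons, List.flatMap_cons, List.foldl_append]
    rw [ih, innerA]


theorem ports_eq (muscle : List (String × List (Int × Int × Int × Int)))
    (hpre : Pre_extract_surface_verts muscle) :
    extract_surface_verts muscle = extract_surface_verts_alt muscle := by
  unfold extract_surface_verts extract_surface_verts_alt
  cases hget : (PySem.Dict.ofList muscle).get? "tetrahedra" with
  | none =>
    exfalso
    rw [PySem.Dict.get?_eq_none_iff_not_mem_keys] at hget
    apply hget
    unfold PySem.Dict.ofList PySem.Dict.update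
    rw [PySem.Dict.keys_foldl_insert_key (key := Prod.fst) (f := fun d x => x.2)]
    exact (PySem.Set.mem_update _ _ _).2 (Or.inr hpre)
  | some tets =>
    simp only
    set K := tets.flatMap (fun t => (tetFaces t).map faceKey) with hK
    have hdict : ((PySem.List.enumerate tets).foldl
      (fun (st : PySem.Dict (List Int) Int × List (List Int)) (tit : Int × (Int × Int × Int × Int)) =>
        (tetFaces tit.2).foldl
          (fun (st : PySem.Dict (List Int) Int × List (List Int)) f =>
            (st.1.modify (faceKey f) 0 (· + 1), st.2 ++ [faceKey f])) st)
      (PySem.Dict.empty, [])).1 = PySem.Dict.counter K := by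
      rw [outerA]; rfl
    have hSA : (PySem.Dict.counter K).items.foldl
        (fun (s : PySem.Set Int) fc => if fc.2 = 1 then PySem.Set.update s fc.1 else s)
        PySem.Set.empty
        = (PySem.Set.ofList K).foldl
            (fun (s : PySem.Set Int) k => if ((K.count k : Int) = 1) then PySem.Set.update s k else s)
            PySem.Set.empty := by
      rw [PySem.Dict.items_counter, List.foldl_map]
    have hmemA : ∀ v : Int, v ∈ ((PySem.Dict.counter K).items.foldl
        (fun (s : PySem.Set Int) fc => if fc.2 = 1 then PySem.Set.update s fc.1 else s)
        PySem.Set.empty) ↔ ∃ k ∈ K, K.count k = 1 ∧ v ∈ k := by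
      intro v
      rw [hSA, mem_foldl_updateIf (P := fun k => ((K.count k : Int) = 1))]
      simp [PySem.Set.mem_ofList, Nat.cast_eq_one]
    have hpw : (PySem.List.sorted K (fun x => x) false).Pairwise (fun a b => a ≤ b) := by
      have h := PySem.List.sorted_pairwise (κ := List Int) K (fun x => x)
      convert h using 2
    have hperm : (PySem.List.sorted K (fun x => x) false).Perm K :=
      PySem.List.sorted_perm K (fun x => x) false
    have hmemB : ∀ v : Int, v ∈ scanRuns (PySem.List.sorted K (fun x => x) false) PySem.Set.empty
        ↔ ∃ k ∈ K, K.count k = 1 ∧ v ∈ k := by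
      intro v
      rw [mem_scanRuns v (PySem.List.sorted K (fun x => x) false).length _ le_rfl _ hpw]
      constructor
      · rintro (h | ⟨k, hk, hc, hv⟩)
        · exact absurd h (List.not_mem_nil)
        · exact ⟨k, hperm.mem_iff.1 hk, by rw [← hperm.count_eq]; exact hc, hv⟩
      · rintro ⟨k, hk, hc, hv⟩
        exact Or.inr ⟨k, hperm.mem_iff.2 hk, by rw [hperm.count_eq]; exact hc, hv⟩
    rw [hdict]
    have hnA : ((PySem.Dict.counter K).items.foldl
        (fun (s : PySem.Set Int) fc => if fc.2 = 1 then PySem.Set.update s fc.1 else s)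
        PySem.Set.empty).Nodup := by
      rw [hSA]
      exact nodup_foldl_updateIf (P := fun k => ((K.count k : Int) = 1)) _ _ List.nodup_nil
    have hnB : (scanRuns (PySem.List.sorted K (fun x => x) false) PySem.Set.empty).Nodup :=
      nodup_scanRuns _ _ List.nodup_nil
    have hperm2 := (List.perm_ext_iff_of_nodup hnA hnB).2 (fun v => by rw [hmemA v, hmemB v])
    exact PySem.List.sorted_eq_sorted_of_perm _ _ _ (fun x y h => h) hperm2

-- ===== VERDICT (by name: the statement is the Claim_ definition above) =====
theorem extract_surface_verts_spec : Claim_equal_extract_surface_verts := by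
  intro muscle _ hpre
  unfold Spec_extract_surface_verts
  exact ports_eq muscle hpre
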